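-- pv_equiv track=rewrite | github.com/rajiv256/NeuralCRNGen | main.py | get_degradation_reactions
-- ===== SOURCE A (Python) =====
-- import itertools
--
-- def _get_indices_from_dims(dims=[]):
--     assert len(dims) <= 2
--
--     # Used for Ep, Em etc.,
--     if len(dims) == 0:
--         return ['']
--
--     if len(dims) == 1:
--         d1 = dims[0]
--         indices = [str(x) for x in range(1, d1 + 1)]
--     if len(dims) == 2:
--         d1 = dims[0]
--         d2 = dims[1]
--         pair_indices = list(itertools.product(range(1, d1+1), range(1, d2+1)))
--         indices = [str(x) + str(y) for x, y in pair_indices]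
--     return indices
--
-- def get_degradation_reactions(d={"G": [2, 2]}):
--     ret = []
--     for k in d:
--         dims = d[k]
--         indices = _get_indices_from_dims(dims)
--         for index in indices:
--             ret += [f"1.0, {k}{index}p --> 0"]
--             ret += [f"1.0, {k}{index}m --> 0"]
--     return ret
-- ===== SOURCE B (Python) =====
-- def get_degradation_reactions(d={"G": [2, 2]}):
--     # Stage 1: build the flat list of species names (key + index string) by
--     # iteratively extending index strings one dimension at a time.
--     names = []
--     for k, dims in d.items():
--         assert len(dims) <= 2
--         idxs = ['']
--         for dim in dims:
--             idxs = [i + str(x) for i in idxs for x in range(1, dim + 1)]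
--         names += [k + i for i in idxs]
--     # Stage 2: one comprehension emits the p/m degradation pair per species.
--     return [f"1.0, {n}{s} --> 0" for n in names for s in "pm"]
-- ===== Notes on version B (the rewrite author's own statement) =====
-- stated objective: alternative
-- what changed: Replaces the per-key branch-on-arity index helper and nested emit loop by two staged passes: first a fold that grows index strings one dimension at a time and collects flat species names, then a single comprehension over names x 'pm' that emits all reaction strings.
import Mathlib
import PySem

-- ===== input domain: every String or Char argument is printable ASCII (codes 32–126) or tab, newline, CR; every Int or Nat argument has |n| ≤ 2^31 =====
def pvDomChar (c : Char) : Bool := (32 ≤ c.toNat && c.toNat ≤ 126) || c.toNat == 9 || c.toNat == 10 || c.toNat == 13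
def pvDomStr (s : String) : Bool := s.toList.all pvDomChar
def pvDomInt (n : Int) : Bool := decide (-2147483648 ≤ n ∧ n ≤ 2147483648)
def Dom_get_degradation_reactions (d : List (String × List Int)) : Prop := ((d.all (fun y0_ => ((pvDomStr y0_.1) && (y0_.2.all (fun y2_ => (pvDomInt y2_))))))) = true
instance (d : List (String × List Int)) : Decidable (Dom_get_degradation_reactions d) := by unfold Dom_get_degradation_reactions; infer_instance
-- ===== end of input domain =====

-- B restructures A into two staged passes (species names first, then one p/m emission pass); same output, same cost ("alternative").

-- ===== PORT A =====
-- _get_indices_from_dims: the assert (len(dims) <= 2) raises outside Pre_; branches kept in A's order.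
def pvIndicesFromDims (dims : List Int) : List String :=
  if dims.length = 0 then [""]
  else
    let indices : List String :=
      if dims.length = 1 then
        (PySem.List.pyRange 1 (dims.getD 0 0 + 1) 1).map PySem.Int.toStr
      else []
    let indices : List String :=
      if dims.length = 2 then
        ((PySem.List.pyRange 1 (dims.getD 0 0 + 1) 1).flatMap (fun x =>
          (PySem.List.pyRange 1 (dims.getD 1 0 + 1) 1).map (fun y => (x, y)))).map
          (fun xy => PySem.Int.toStr xy.1 ++ PySem.Int.toStr xy.2)
      else indices
    indices

def get_degradation_reactions (d : List (String × List Int)) : List String :=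
  d.foldl (fun ret kv =>
    (pvIndicesFromDims kv.2).foldl (fun ret index =>
      ret ++ ["1.0, " ++ kv.1 ++ index ++ "p --> 0"] ++ ["1.0, " ++ kv.1 ++ index ++ "m --> 0"]) ret) []

-- ===== PORT B =====
-- idxs = ['']; for dim in dims: idxs = [i + str(x) for i in idxs for x in range(1, dim+1)]
def pvIdxs (dims : List Int) : List String :=
  dims.foldl (fun idxs dim =>
    idxs.flatMap (fun i => (PySem.List.pyRange 1 (dim + 1) 1).map (fun x => i ++ PySem.Int.toStr x))) [""]

def get_degradation_reactions_alt (d : List (String × List Int)) : List String :=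
  let names := d.foldl (fun names kv => names ++ (pvIdxs kv.2).map (fun i => kv.1 ++ i)) []
  names.flatMap (fun n => ("pm".toList).map (fun s => "1.0, " ++ n ++ s.toString ++ " --> 0"))

-- ===== PRECONDITION & SPEC =====
-- Pre_: A's (and B's) assert raises AssertionError whenever some value list has length > 2.
def Pre_get_degradation_reactions (d : List (String × List Int)) : Prop :=
  ∀ kv ∈ d, kv.2.length ≤ 2
instance (d : List (String × List Int)) : Decidable (Pre_get_degradation_reactions d) := by unfold Pre_get_degradation_reactions; infer_instance
def pvWitness_get_degradation_reactions : (List (String × List Int)) := [("G", [2, 2])]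

def Spec_get_degradation_reactions (d : List (String × List Int)) (out : List String) : Prop := out = get_degradation_reactions_alt d
instance (d : List (String × List Int)) (out : List String) : Decidable (Spec_get_degradation_reactions d out) := by unfold Spec_get_degradation_reactions; infer_instance

-- ===== CLAIM (what is proved, stated in full; the proofs are below) =====
def Claim_equal_get_degradation_reactions : Prop := ∀ (d : List (String × List Int)), Dom_get_degradation_reactions d → Pre_get_degradation_reactions d → Spec_get_degradation_reactions d (get_degradation_reactions d)

-- ===== LEMMAS AND PROOFS =====

-- A's branch-per-arity index helper computes what B's iterative extension computes (arity ≤ 2)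
theorem pv_indices_eq (dims : List Int) (h : dims.length ≤ 2) :
    pvIndicesFromDims dims = pvIdxs dims := by
  match dims with
  | [] => rfl
  | [a] => simp [pvIndicesFromDims, pvIdxs]
  | [a, b] =>
      simp [pvIndicesFromDims, pvIdxs, List.flatMap_map, List.map_flatMap, Function.comp_def]
  | _ :: _ :: _ :: _ => simp at h

-- the p/m pair emitted for one species name
theorem pv_pm (k i : String) :
    ("pm".toList).map (fun s => "1.0, " ++ (k ++ i) ++ s.toString ++ " --> 0")
      = ["1.0, " ++ k ++ i ++ "p --> 0", "1.0, " ++ k ++ i ++ "m --> 0"] := by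
  simp [List.map]
  constructor <;> · apply String.ext; simp

theorem pv_inner_fold (l : List String) (k : String) (ret : List String) :
    l.foldl (fun r i => r ++ ["1.0, " ++ k ++ i ++ "p --> 0"] ++ ["1.0, " ++ k ++ i ++ "m --> 0"]) ret
      = ret ++ l.flatMap (fun i => ["1.0, " ++ k ++ i ++ "p --> 0", "1.0, " ++ k ++ i ++ "m --> 0"]) := by
  induction l generalizing ret with
  | nil => simp
  | cons x xs ih => simp [List.flatMap_def, List.append_assoc]

theorem pv_names_fold (d : List (String × List Int)) (ns : List String) :
    d.foldl (fun names kv => names ++ (pvIdxs kv.2).map (fun i => kv.1 ++ i)) ns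
      = ns ++ d.flatMap (fun kv => (pvIdxs kv.2).map (fun i => kv.1 ++ i)) := by
  induction d generalizing ns with
  | nil => simp
  | cons kv rest ih => simp [ih, List.flatMap_def, List.append_assoc]

theorem pv_main (d : List (String × List Int)) (h : ∀ kv ∈ d, kv.2.length ≤ 2) (ret : List String) :
    d.foldl (fun ret kv =>
      (pvIndicesFromDims kv.2).foldl (fun ret index =>
        ret ++ ["1.0, " ++ kv.1 ++ index ++ "p --> 0"] ++ ["1.0, " ++ kv.1 ++ index ++ "m --> 0"]) ret) ret
    = ret ++ (d.flatMap (fun kv => (pvIdxs kv.2).map (fun i => kv.1 ++ i))).flatMap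
        (fun n => ("pm".toList).map (fun s => "1.0, " ++ n ++ s.toString ++ " --> 0")) := by
  induction d generalizing ret with
  | nil => simp
  | cons kv rest ih =>
      simp only [List.foldl_cons, List.flatMap_cons, List.flatMap_append]
      rw [pv_inner_fold, pv_indices_eq kv.2 (h kv (List.mem_cons_self ..)),
        ih (fun x hx => h x (List.mem_cons_of_mem _ hx)), List.append_assoc]
      congr 1
      congr 1
      rw [List.flatMap_map]
      apply List.flatMap_congr
      intro i _
      exact (pv_pm kv.1 i).symm

-- ===== VERDICT (by name: the statement is the Claim_ definition above) =====
theorem get_degradation_reactions_spec : Claim_equal_get_degradation_reactions := by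
  intro d _ hpre
  unfold Spec_get_degradation_reactions get_degradation_reactions get_degradation_reactions_alt
  rw [pv_main d hpre, pv_names_fold]
  simp
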